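-- pv_equiv track=rewrite | github.com/AntiSlang/Petergof-Bot | bot.py | shorten_text
-- ===== SOURCE A (Python) =====
-- def shorten_text(text, length=1020):
--     new_text = text
--     if len(text) > length:
--         new_text = ''
--         for line in text.split('\n'):
--             if len(new_text + f'\n{line}') > length:
--                 break
--             else:
--                 new_text += f'\n{line}'
--     return new_text
-- ===== SOURCE B (Python) =====
-- def shorten_text(text, length=1020):
--     if len(text) <= length:
--         return text
--     lines = text.split('\n')
--     # table of cumulative encoded costs: prefix[i] = sum of len(line)+1 over lines[0..i]
--     prefix = []
--     total = 0
--     for line in lines: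
--         total += len(line) + 1
--         prefix.append(total)
--     # binary search for the count k of leading lines whose cumulative cost fits
--     lo, hi = 0, len(prefix)
--     while lo < hi:
--         mid = (lo + hi) // 2
--         if prefix[mid] <= length:
--             lo = mid + 1
--         else:
--             hi = mid
--     if lo == 0:
--         return ''
--     return '\n' + '\n'.join(lines[:lo])
-- ===== Notes on version B (the rewrite author's own statement) =====
-- stated objective: alternative
-- what changed: Replaces A's break-on-overflow string-concatenation loop with a precomputed cumulative-cost table plus a binary search for the cutoff line count, reconstructing the result with one join.
import Mathlib
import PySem

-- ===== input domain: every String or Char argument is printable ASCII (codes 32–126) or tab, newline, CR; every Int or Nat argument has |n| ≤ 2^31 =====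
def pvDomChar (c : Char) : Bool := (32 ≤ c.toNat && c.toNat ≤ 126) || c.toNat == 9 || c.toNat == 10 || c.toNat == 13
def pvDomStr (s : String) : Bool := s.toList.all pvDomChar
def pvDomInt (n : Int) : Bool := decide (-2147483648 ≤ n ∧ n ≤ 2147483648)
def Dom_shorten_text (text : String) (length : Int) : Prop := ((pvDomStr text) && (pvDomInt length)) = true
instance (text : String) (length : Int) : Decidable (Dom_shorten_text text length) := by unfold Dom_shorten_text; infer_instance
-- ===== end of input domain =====

-- B replaces A's break-on-overflow concatenation loop by a cumulative-cost table plus a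
-- binary search for the cutoff line count (objective: alternative decomposition).

-- ===== PORT A =====
-- the 'for line in text.split('\n'): if len(new_text + '\n'+line) > length: break else: new_text += '\n'+line' loop
def shortenLoopA (lines : List (List Char)) (acc : List Char) (length : Int) : List Char :=
  match lines with
  | [] => acc
  | l :: ls =>
    if ((acc ++ '\n' :: l).length : Int) > length then acc
    else shortenLoopA ls (acc ++ '\n' :: l) length

def shorten_text (text : String) (length : Int) : String :=
  if PySem.Str.len text > length then
    String.mk (shortenLoopA (PySem.Chars.splitOn text.toList ['\n']) [] length)
  else text

-- ===== PORT B =====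
-- the 'for line in lines: total += len(line)+1; pfx.append(total)' loop
def prefixCosts (lines : List (List Char)) : List Int :=
  (lines.foldl (fun (st : List Int × Int) l =>
    (st.1 ++ [st.2 + (l.length : Int) + 1], st.2 + (l.length : Int) + 1)) ([], 0)).1

-- the 'while lo < hi: …' binary search (lo, hi are nonnegative Python ints; Nat is exact here)
def bsearchB (pfx : List Int) (length : Int) (lo hi : Nat) : Nat :=
  if lo < hi then
    let mid := (lo + hi) / 2
    if PySem.List.pyGetD pfx (mid : Int) 0 ≤ length then bsearchB pfx length (mid + 1) hi
    else bsearchB pfx length lo mid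
  else lo
termination_by hi - lo
decreasing_by all_goals omega

def shorten_text_alt (text : String) (length : Int) : String :=
  if PySem.Str.len text ≤ length then text
  else
    let lines := PySem.Chars.splitOn text.toList ['\n']
    let pfx := prefixCosts lines
    let k := bsearchB pfx length 0 pfx.length
    -- lines[:k] with 0 ≤ k ≤ len(lines) is exactly take k
    if k = 0 then String.mk []
    else String.mk ('\n' :: PySem.Chars.join ['\n'] (lines.take k))

-- ===== PRECONDITION & SPEC =====
def Spec_shorten_text (text : String) (length : Int) (out : String) : Prop := out = shorten_text_alt text length
instance (text : String) (length : Int) (out : String) : Decidable (Spec_shorten_text text length out) := by unfold Spec_shorten_text; infer_instance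

-- ===== CLAIM (what is proved, stated in full; the proofs are below) =====
def Claim_equal_shorten_text : Prop := ∀ (text : String) (length : Int), Dom_shorten_text text length → Spec_shorten_text text length (shorten_text text length)

-- ===== LEMMAS AND PROOFS =====

-- number of leading lines the greedy loop keeps, as a function of the remaining budget
def fitCount (ls : List (List Char)) (budget : Int) : Nat :=
  match ls with
  | [] => 0
  | l :: t => if ((l.length : Int) + 1 > budget) then 0 else 1 + fitCount t (budget - ((l.length : Int) + 1))

-- cumulative costs starting from a running total s
def psums (ls : List (List Char)) (s : Int) : List Int :=
  match ls with
  | [] => []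
  | l :: t => (s + (l.length : Int) + 1) :: psums t (s + (l.length : Int) + 1)

theorem loopA_eq (ls : List (List Char)) (acc : List Char) (length : Int) :
    shortenLoopA ls acc length =
      acc ++ (ls.take (fitCount ls (length - acc.length))).flatMap (fun l => '\n' :: l) := by
  induction ls generalizing acc with
  | nil => simp [shortenLoopA, fitCount]
  | cons l t ih =>
    simp only [shortenLoopA, fitCount]
    have hlen : (((acc ++ '\n' :: l).length : Int)) = acc.length + (l.length + 1) := by
      simp only [List.length_append, List.length_cons]; push_cast; ring
    by_cases h : ((l.length : Int) + 1 > length - acc.length)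
    · rw [if_pos (by omega), if_pos h]
      simp
    · rw [if_neg (by omega), if_neg h]
      rw [ih]
      have : ((length - ((acc ++ '\n' :: l).length : Int))) = length - acc.length - (l.length + 1) := by
        rw [hlen]; ring
      simp only [this]
      rw [Nat.add_comm, List.take_succ_cons]
      simp

theorem prefixCosts_fold (ls : List (List Char)) (accL : List Int) (s : Int) :
    (ls.foldl (fun (st : List Int × Int) l =>
      (st.1 ++ [st.2 + (l.length : Int) + 1], st.2 + (l.length : Int) + 1)) (accL, s)).1
      = accL ++ psums ls s := by
  induction ls generalizing accL s with
  | nil => simp [psums]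
  | cons l t ih => simp [List.foldl, psums, ih]

theorem prefixCosts_eq (ls : List (List Char)) : prefixCosts ls = psums ls 0 := by
  have := prefixCosts_fold ls [] 0
  simpa [prefixCosts] using this

theorem psums_length (ls : List (List Char)) (s : Int) : (psums ls s).length = ls.length := by
  induction ls generalizing s with
  | nil => rfl
  | cons l t ih => simp [psums, ih]

theorem fitCount_le (ls : List (List Char)) (b : Int) : fitCount ls b ≤ ls.length := by
  induction ls generalizing b with
  | nil => simp [fitCount]
  | cons l t ih =>
    simp only [fitCount]
    split
    · omega
    · have := ih (b - ((l.length : Int) + 1)); simp; omega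

theorem fitCount_eq_zero (ls : List (List Char)) (b : Int) (hb : b < 1) : fitCount ls b = 0 := by
  cases ls with
  | nil => rfl
  | cons l t => simp only [fitCount]; rw [if_pos (by omega)]

theorem psums_getD_iff (ls : List (List Char)) (s b : Int) (j : Nat) (hj : j < ls.length) :
    ((psums ls s).getD j 0 ≤ b + s ↔ j < fitCount ls b) := by
  induction ls generalizing s b j with
  | nil => simp at hj
  | cons l t ih =>
    cases j with
    | zero =>
      simp only [psums, fitCount, List.getD_cons_zero]
      constructor
      · intro h; rw [if_neg (by omega)]; omega
      · intro h
        by_cases hc : (l.length : Int) + 1 > b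
        · rw [if_pos hc] at h; omega
        · omega
    | succ j =>
      simp only [psums, fitCount, List.getD_cons_succ]
      have hj' : j < t.length := by simpa using hj
      have := ih (s + (l.length : Int) + 1) (b - ((l.length : Int) + 1)) j hj'
      by_cases hc : (l.length : Int) + 1 > b
      · rw [if_pos hc]
        have h0 : fitCount t (b - ((l.length : Int) + 1)) = 0 :=
          fitCount_eq_zero _ _ (by omega)
        rw [h0] at this
        constructor
        · intro h; exact absurd ((by omega : (psums t (s + (l.length : Int) + 1)).getD j 0 ≤ (b - ((l.length : Int) + 1)) + (s + (l.length : Int) + 1)) ) (by rw [this] at *; omega)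
        · omega
      · rw [if_neg hc]
        constructor
        · intro h
          have : j < fitCount t (b - ((l.length : Int) + 1)) := this.mp (by omega)
          omega
        · intro h
          have : (psums t (s + (l.length : Int) + 1)).getD j 0 ≤ (b - ((l.length : Int) + 1)) + (s + (l.length : Int) + 1) := this.mpr (by omega)
          omega

theorem bsearchB_eq (pfx : List Int) (length : Int) (K : Nat)
    (_hK : K ≤ pfx.length)
    (hiff : ∀ j, j < pfx.length → (pfx.getD j 0 ≤ length ↔ j < K)) :
    ∀ n lo hi, hi - lo ≤ n → lo ≤ hi → hi ≤ pfx.length → lo ≤ K → K ≤ hi →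
      bsearchB pfx length lo hi = K := by
  intro n
  induction n with
  | zero =>
    intro lo hi h1 h2 h3 h4 h5
    rw [bsearchB, if_neg (by omega)]
    omega
  | succ n ih =>
    intro lo hi h1 h2 h3 h4 h5
    rw [bsearchB]
    by_cases h : lo < hi
    · rw [if_pos h]
      have hmid1 : lo ≤ (lo + hi) / 2 := by omega
      have hmid2 : (lo + hi) / 2 < hi := by omega
      have hmidlen : (lo + hi) / 2 < pfx.length := by omega
      simp only [PySem.List.pyGetD_natCast]
      by_cases hp : pfx.getD ((lo + hi) / 2) 0 ≤ length
      · rw [if_pos hp]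
        have : (lo + hi) / 2 < K := (hiff _ hmidlen).mp hp
        exact ih _ _ (by omega) (by omega) (by omega) (by omega) (by omega)
      · rw [if_neg hp]
        have : ¬ ((lo + hi) / 2 < K) := fun hc => hp ((hiff _ hmidlen).mpr hc)
        exact ih _ _ (by omega) (by omega) (by omega) (by omega) (by omega)
    · rw [if_neg h]; omega

theorem flatMap_nl_eq_join (ls : List (List Char)) :
    ls.flatMap (fun l => '\n' :: l) =
      match ls with
      | [] => []
      | _ :: _ => '\n' :: PySem.Chars.join ['\n'] ls := by
  induction ls with
  | nil => rfl
  | cons a t ih =>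
    cases t with
    | nil => simp [PySem.Chars.join, List.intercalate]
    | cons b r =>
      simp only [List.flatMap_cons] at *
      rw [ih, PySem.Chars.join_cons_cons]
      simp

-- ===== VERDICT (by name: the statement is the Claim_ definition above) =====
theorem shorten_text_spec : Claim_equal_shorten_text := by
  intro text length _
  unfold Spec_shorten_text shorten_text shorten_text_alt
  by_cases h : PySem.Str.len text > length
  · rw [if_pos h, if_neg (by omega)]
    set lines := PySem.Chars.splitOn text.toList ['\n'] with hlines
    have hK : bsearchB (prefixCosts lines) length 0 (prefixCosts lines).length
        = fitCount lines length := by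
      apply bsearchB_eq (n := (prefixCosts lines).length)
      · rw [prefixCosts_eq, psums_length]; exact fitCount_le _ _
      · intro j hj
        rw [prefixCosts_eq] at hj ⊢
        rw [psums_length] at hj
        simpa using psums_getD_iff lines 0 length j hj
      all_goals (try rw [prefixCosts_eq, psums_length])
      all_goals (have := fitCount_le lines length; omega)
    simp only [hK]
    rw [loopA_eq]
    simp only [List.length_nil, Nat.cast_zero, Int.sub_zero, List.nil_append]
    rw [flatMap_nl_eq_join]
    by_cases hz : fitCount lines length = 0
    · rw [if_pos hz, hz]
      simp
    · rw [if_neg hz]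
      have : lines.take (fitCount lines length) ≠ [] := by
        have := fitCount_le lines length
        intro hc
        rcases List.eq_nil_iff_length_eq_zero.mp hc with h0
        rw [List.length_take] at h0
        omega
      cases hlt : lines.take (fitCount lines length) with
      | nil => exact absurd hlt this
      | cons a t => rfl
  · rw [if_neg h, if_pos (by omega)]
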